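-- pv_equiv track=rewrite | github.com/MrBrantCode/unitest_baseline | mut_generate/mist_train_cf/cf_99705/solution.py | find_highest_salary
-- ===== SOURCE A (Python) =====
-- def partition(arr, low, high):
--     pivot = arr[high]["salary"]
--     i = low - 1
--     for j in range(low, high):
--         if arr[j]["salary"] >= pivot:
--             i += 1
--             arr[i], arr[j] = arr[j], arr[i]
--     arr[i + 1], arr[high] = arr[high], arr[i + 1]
--     return i + 1
--
-- def quicksort(arr, low, high):
--     if low < high:
--         pi = partition(arr, low, high)
--         quicksort(arr, low, pi - 1)
--         quicksort(arr, pi + 1, high)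
--
-- def find_highest_salary(employees):
--     quicksort(employees, 0, len(employees) - 1)
--     highest_salary = employees[0]["salary"]
--     highest_earners = []
--     for employee in employees:
--         if employee["salary"] == highest_salary:
--             highest_earners.append(employee)
--         else:
--             break
--     return highest_earners
-- ===== SOURCE B (Python) =====
-- def find_highest_salary(employees):
--     # One pass: the highest salary, then keep the earners in original order.
--     top = employees[0]["salary"]
--     for e in employees:
--         s = e["salary"]
--         if s > top:
--             top = s
--     return [e for e in employees if e["salary"] == top]
-- ===== Notes on version B (the rewrite author's own statement) =====
-- stated objective: faster
-- what changed: A quicksorts the whole list in place (recursive Lomuto partition) and then reads off the leading equal-salary block; B makes one pass to find the maximum salary and filters the list, relying on the fact that A's partition keeps max-salary elements in original relative order. B does not mutate the input list; A sorts it in place.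
import Mathlib
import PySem

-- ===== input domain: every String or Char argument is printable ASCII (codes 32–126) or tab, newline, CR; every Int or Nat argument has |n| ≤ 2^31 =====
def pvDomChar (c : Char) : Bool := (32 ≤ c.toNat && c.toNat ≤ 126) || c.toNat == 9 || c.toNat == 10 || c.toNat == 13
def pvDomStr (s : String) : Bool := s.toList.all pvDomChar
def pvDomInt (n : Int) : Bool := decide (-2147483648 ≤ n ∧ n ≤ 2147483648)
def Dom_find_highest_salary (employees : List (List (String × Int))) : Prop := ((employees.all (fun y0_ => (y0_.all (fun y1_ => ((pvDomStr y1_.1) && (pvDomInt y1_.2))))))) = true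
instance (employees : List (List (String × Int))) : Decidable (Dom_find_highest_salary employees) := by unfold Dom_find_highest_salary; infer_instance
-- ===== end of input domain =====

-- B replaces A's in-place quicksort with one max-computing pass plus a filter (O(n) instead of
-- sorting); the return value is the same because A's Lomuto partition keeps the max-salary
-- elements in their original relative order.  NOTE: A sorts `employees` in place (a caller-visible
-- mutation); B does not mutate — the equivalence proved here is about the RETURN value only.

-- ===== PORT A =====
-- employee["salary"]: first match in the assoc list; Pre_ guarantees the key exists,
-- so the `.getD 0` default is never the value used on admitted inputs.
def pvSal (e : List (String × Int)) : Int := ((PySem.Dict.mk e).get? "salary").getD 0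

-- arr[i], arr[j] = arr[j], arr[i]; all indices used are in range on admitted inputs,
-- where pyGetD/pySetD are exact.
def pvSwap (arr : List (List (String × Int))) (i j : Int) : List (List (String × Int)) :=
  let vi := PySem.List.pyGetD arr i []
  let vj := PySem.List.pyGetD arr j []
  PySem.List.pySetD (PySem.List.pySetD arr i vj) j vi

-- partition(arr, low, high): returns (mutated arr, i + 1)
def pvPartition (arr : List (List (String × Int))) (low high : Int) :
    List (List (String × Int)) × Int :=
  let pivot := pvSal (PySem.List.pyGetD arr high [])
  let r := (PySem.List.pyRange low high 1).foldl
    (fun (s : List (List (String × Int)) × Int) j =>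
      if pvSal (PySem.List.pyGetD s.1 j []) ≥ pivot then (pvSwap s.1 (s.2 + 1) j, s.2 + 1)
      else s)
    (arr, low - 1)
  (pvSwap r.1 (r.2 + 1) high, r.2 + 1)

-- the returned pivot index lies in [low, high] (needed for termination)
lemma pvPartition_snd_bound (arr : List (List (String × Int))) (low high : Int)
    (h : low < high) :
    low ≤ (pvPartition arr low high).2 ∧ (pvPartition arr low high).2 ≤ high := by
  have key : ∀ (js : List Int) (pivot : Int)
      (init : List (List (String × Int)) × Int),
      init.2 ≤ (js.foldl
        (fun (s : List (List (String × Int)) × Int) j =>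
          if pvSal (PySem.List.pyGetD s.1 j []) ≥ pivot then (pvSwap s.1 (s.2 + 1) j, s.2 + 1)
          else s) init).2 ∧
      (js.foldl
        (fun (s : List (List (String × Int)) × Int) j =>
          if pvSal (PySem.List.pyGetD s.1 j []) ≥ pivot then (pvSwap s.1 (s.2 + 1) j, s.2 + 1)
          else s) init).2 ≤ init.2 + js.length := by
    intro js
    induction js with
    | nil => intro pivot init; simp
    | cons j rest ih =>
      intro pivot init
      simp only [List.foldl_cons, List.length_cons]
      by_cases hc : pvSal (PySem.List.pyGetD init.1 j []) ≥ pivot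
      · simp only [if_pos hc]
        have := ih pivot (pvSwap init.1 (init.2 + 1) j, init.2 + 1)
        constructor <;> omega
      · simp only [if_neg hc]
        have := ih pivot init
        constructor <;> omega
  unfold pvPartition
  simp only
  have hlen : (PySem.List.pyRange low high 1).length = (high - low).toNat :=
    PySem.List.length_pyRange_one low high
  have := key (PySem.List.pyRange low high 1)
    (pvSal (PySem.List.pyGetD arr high [])) (arr, low - 1)
  rw [hlen] at this
  constructor <;> omega

-- quicksort(arr, low, high): recursive, returns the mutated arr
def pvQuicksort (arr : List (List (String × Int))) (low high : Int) :
    List (List (String × Int)) :=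
  if h : low < high then
    let p := pvPartition arr low high
    pvQuicksort (pvQuicksort p.1 low (p.2 - 1)) (p.2 + 1) high
  else arr
termination_by (high - low + 1).toNat
decreasing_by
  · have := pvPartition_snd_bound arr low high h; omega
  · have := pvPartition_snd_bound arr low high h; omega

-- for employee in the sorted list: append while salary equals `hs`, break otherwise
def pvCollect (hs : Int) : List (List (String × Int)) → List (List (String × Int))
  | [] => []
  | e :: rest => if pvSal e = hs then e :: pvCollect hs rest else []

def find_highest_salary (employees : List (List (String × Int))) : List (List (String × Int)) :=
  let sorted := pvQuicksort employees 0 ((employees.length : Int) - 1)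
  pvCollect (pvSal (PySem.List.pyGetD sorted 0 [])) sorted

-- ===== PORT B =====
-- one pass for the maximum salary (top = employees[0]["salary"]; for e in employees: …),
-- then the list comprehension keeping the top earners in original order
def find_highest_salary_alt (employees : List (List (String × Int))) :
    List (List (String × Int)) :=
  let top := employees.foldl
    (fun t e => if pvSal e > t then pvSal e else t)
    (pvSal (PySem.List.pyGetD employees 0 []))
  employees.filter (fun e => pvSal e == top)

-- ===== PRECONDITION & SPEC =====
-- Pre_ excludes exactly the inputs where the Python A raises: the empty list
-- (IndexError at employees[0]) and lists with an employee lacking the "salary"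
-- key (KeyError); B raises identically there (employees[0] / e["salary"]).
def Pre_find_highest_salary (employees : List (List (String × Int))) : Prop :=
  employees ≠ [] ∧ ∀ e ∈ employees, ((PySem.Dict.mk e).get? "salary").isSome = true
instance (employees : List (List (String × Int))) : Decidable (Pre_find_highest_salary employees) := by
  unfold Pre_find_highest_salary; infer_instance

def pvWitness_find_highest_salary : (List (List (String × Int))) :=
  [[("salary", 3)], [("salary", 1)]]

def Spec_find_highest_salary (employees : List (List (String × Int))) (out : List (List (String × Int))) : Prop := out = find_highest_salary_alt employees
instance (employees : List (List (String × Int))) (out : List (List (String × Int))) : Decidable (Spec_find_highest_salary employees out) := by unfold Spec_find_highest_salary; infer_instance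

-- ===== CLAIM (what is proved, stated in full; the proofs are below) =====
def Claim_equal_find_highest_salary : Prop := ∀ (employees : List (List (String × Int))), Dom_find_highest_salary employees → Pre_find_highest_salary employees → Spec_find_highest_salary employees (find_highest_salary employees)

-- ===== LEMMAS AND PROOFS =====

-- indexing / in-place update at a position described by a list decomposition
lemma pvGetAt (u w : List (List (String × Int))) (c d : List (String × Int)) :
    PySem.List.pyGetD (u ++ c :: w) (u.length : Int) d = c := by
  simp [PySem.List.pyGetD_natCast, List.getD]

lemma pvSetAt (u w : List (List (String × Int))) (c v : List (String × Int)) :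
    PySem.List.pySetD (u ++ c :: w) (u.length : Int) v = u ++ v :: w := by
  rw [PySem.List.pySetD_natCast]
  induction u with
  | nil => simp
  | cons x xs ih => simp [ih]

lemma pvSwap_self (u w : List (List (String × Int))) (a : List (String × Int)) :
    pvSwap (u ++ a :: w) (u.length : Int) (u.length : Int) = u ++ a :: w := by
  simp [pvSwap]

lemma pvSwap_decomp (u mid w : List (List (String × Int))) (a b : List (String × Int)) :
    pvSwap (u ++ a :: mid ++ b :: w) (u.length : Int) ((u.length + mid.length + 1 : Nat) : Int)
      = u ++ b :: mid ++ a :: w := by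
  have h2 : ((u.length + mid.length + 1 : Nat) : Int) = (((u ++ a :: mid).length : Nat) : Int) := by
    simp; omega
  unfold pvSwap
  rw [h2]
  rw [show u ++ a :: mid ++ b :: w = (u ++ a :: mid) ++ b :: w from by simp]
  rw [pvGetAt (u ++ a :: mid) w b]
  rw [show (u ++ a :: mid) ++ b :: w = u ++ a :: (mid ++ b :: w) from by simp]
  rw [pvGetAt u (mid ++ b :: w) a]
  show PySem.List.pySetD (PySem.List.pySetD (u ++ a :: (mid ++ b :: w)) (u.length : Int) b)
      (((u ++ a :: mid).length : Nat) : Int) a = u ++ b :: mid ++ a :: w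
  rw [pvSetAt u (mid ++ b :: w) a b]
  have h3 : ((u ++ a :: mid).length : Int) = ((u ++ b :: mid).length : Int) := by simp
  rw [h3]
  rw [show u ++ b :: (mid ++ b :: w) = (u ++ b :: mid) ++ b :: w from by simp]
  rw [pvSetAt (u ++ b :: mid) w b a]

-- the Lomuto loop: elements ≥ pivot are collected in original order in front,
-- the rest forms some permutation behind them
lemma pvLoop (pivot : Int) :
    ∀ (sc : List (List (String × Int))) (g lt pre rest : List (List (String × Int))),
    ∃ lt', (PySem.List.pyRange ((pre.length + g.length + lt.length : Nat) : Int)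
              ((pre.length + g.length + lt.length + sc.length : Nat) : Int) 1).foldl
      (fun (s : List (List (String × Int)) × Int) j =>
        if pvSal (PySem.List.pyGetD s.1 j []) ≥ pivot then (pvSwap s.1 (s.2 + 1) j, s.2 + 1)
        else s)
      (pre ++ g ++ (lt ++ (sc ++ rest)), ((pre.length + g.length : Nat) : Int) - 1)
      = (pre ++ (g ++ sc.filter (fun e => decide (pvSal e ≥ pivot))) ++ (lt' ++ rest),
         ((pre.length + (g ++ sc.filter (fun e => decide (pvSal e ≥ pivot))).length : Nat) : Int) - 1)
      ∧ lt'.Perm (lt ++ sc.filter (fun e => !decide (pvSal e ≥ pivot))) := by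
  intro sc
  induction sc with
  | nil =>
    intro g lt pre rest
    refine ⟨lt, ?_, by simp⟩
    rw [PySem.List.pyRange_one_eq_nil (by simp)]
    simp
  | cons x sc ih =>
    intro g lt pre rest
    rw [PySem.List.pyRange_one_cons (by simp only [List.length_cons]; push_cast; omega)]
    rw [List.foldl_cons]
    by_cases hx : pvSal x ≥ pivot
    · -- x joins the ≥-block: swap arr[i+1] with arr[j]
      have hget : PySem.List.pyGetD (pre ++ g ++ (lt ++ (x :: sc ++ rest)))
          ((pre.length + g.length + lt.length : Nat) : Int) [] = x := by
        rw [show pre ++ g ++ (lt ++ (x :: sc ++ rest))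
              = (pre ++ g ++ lt) ++ x :: (sc ++ rest) from by simp <;> omega]
        rw [show ((pre.length + g.length + lt.length : Nat) : Int)
              = ((pre ++ g ++ lt).length : Int) from by simp <;> omega]
        exact pvGetAt _ _ _ _
      rw [if_pos (by rw [hget]; exact hx)]
      have hidx : ((pre.length + g.length : Nat) : Int) - 1 + 1
          = ((pre.length + g.length : Nat) : Int) := by omega
      cases lt with
      | nil =>
        -- i+1 = j: the swap is the identity
        have hsw : pvSwap (pre ++ g ++ ([] ++ (x :: sc ++ rest)))
            (((pre.length + g.length : Nat) : Int) - 1 + 1)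
            ((pre.length + g.length + ([] : List (List (String × Int))).length : Nat) : Int)
            = pre ++ g ++ ([] ++ (x :: sc ++ rest)) := by
          rw [hidx]
          rw [show pre ++ g ++ ([] ++ (x :: sc ++ rest))
                = (pre ++ g) ++ x :: (sc ++ rest) from by simp <;> omega]
          rw [show ((pre.length + g.length + ([] : List (List (String × Int))).length : Nat) : Int)
                = ((pre ++ g).length : Int) from by simp <;> omega]
          rw [show ((pre.length + g.length : Nat) : Int) = ((pre ++ g).length : Int) from by simp <;> omega]
          exact pvSwap_self _ _ _
        rw [hsw, hidx]
        have heq1 : pre ++ g ++ ([] ++ (x :: sc ++ rest))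
            = pre ++ (g ++ [x]) ++ ([] ++ (sc ++ rest)) := by simp
        have heq2 : ((pre.length + g.length : Nat) : Int)
            = ((pre.length + (g ++ [x]).length : Nat) : Int) - 1 := by simp <;> omega
        have harg : ((pre.length + g.length + ([] : List (List (String × Int))).length : Nat) : Int) + 1
            = ((pre.length + (g ++ [x]).length + ([] : List (List (String × Int))).length : Nat) : Int) := by
          simp; omega
        have hend : ((pre.length + g.length + ([] : List (List (String × Int))).length + (x :: sc).length : Nat) : Int)
            = ((pre.length + (g ++ [x]).length + ([] : List (List (String × Int))).length + sc.length : Nat) : Int) := by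
          simp; omega
        rw [heq1, heq2, harg, hend]
        obtain ⟨lt', h1, h2⟩ := ih (g ++ [x]) [] pre rest
        refine ⟨lt', ?_, ?_⟩
        · rw [h1]
          simp [hx]
        · simpa [hx] using h2
      | cons a0 lt0 =>
        -- swap the first <-element a0 with x
        have hsw : pvSwap (pre ++ g ++ ((a0 :: lt0) ++ (x :: sc ++ rest)))
            (((pre.length + g.length : Nat) : Int) - 1 + 1)
            ((pre.length + g.length + (a0 :: lt0).length : Nat) : Int)
            = pre ++ (g ++ [x]) ++ ((lt0 ++ [a0]) ++ (sc ++ rest)) := by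
          rw [hidx]
          rw [show pre ++ g ++ ((a0 :: lt0) ++ (x :: sc ++ rest))
                = (pre ++ g) ++ a0 :: lt0 ++ x :: (sc ++ rest) from by simp <;> omega]
          rw [show ((pre.length + g.length : Nat) : Int) = ((pre ++ g).length : Int) from by simp <;> omega]
          rw [show ((pre.length + g.length + (a0 :: lt0).length : Nat) : Int)
                = (((pre ++ g).length + lt0.length + 1 : Nat) : Int) from by simp <;> omega]
          rw [pvSwap_decomp (pre ++ g) lt0 (sc ++ rest) a0 x]
          simp
        rw [hsw, hidx]
        have harg : ((pre.length + g.length + (a0 :: lt0).length : Nat) : Int) + 1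
            = ((pre.length + (g ++ [x]).length + (lt0 ++ [a0]).length : Nat) : Int) := by
          simp; omega
        have hend : ((pre.length + g.length + (a0 :: lt0).length + (x :: sc).length : Nat) : Int)
            = ((pre.length + (g ++ [x]).length + (lt0 ++ [a0]).length + sc.length : Nat) : Int) := by
          simp; omega
        have heq2 : ((pre.length + g.length : Nat) : Int)
            = ((pre.length + (g ++ [x]).length : Nat) : Int) - 1 := by simp <;> omega
        rw [harg, hend, heq2]
        obtain ⟨lt', h1, h2⟩ := ih (g ++ [x]) (lt0 ++ [a0]) pre rest
        refine ⟨lt', ?_, ?_⟩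
        · rw [h1]
          simp [hx]
        · refine h2.trans ?_
          have : (lt0 ++ [a0]).Perm (a0 :: lt0) := List.perm_append_singleton a0 lt0
          simpa [hx] using this.append_right _
    · -- x stays: conceptually appended to the <-block
      have hget : PySem.List.pyGetD (pre ++ g ++ (lt ++ (x :: sc ++ rest)))
          ((pre.length + g.length + lt.length : Nat) : Int) [] = x := by
        rw [show pre ++ g ++ (lt ++ (x :: sc ++ rest))
              = (pre ++ g ++ lt) ++ x :: (sc ++ rest) from by simp <;> omega]
        rw [show ((pre.length + g.length + lt.length : Nat) : Int)
              = ((pre ++ g ++ lt).length : Int) from by simp <;> omega]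
        exact pvGetAt _ _ _ _
      rw [if_neg (by rw [hget]; exact hx)]
      have heq1 : pre ++ g ++ (lt ++ (x :: sc ++ rest))
          = pre ++ g ++ ((lt ++ [x]) ++ (sc ++ rest)) := by simp
      have harg : ((pre.length + g.length + lt.length : Nat) : Int) + 1
          = ((pre.length + g.length + (lt ++ [x]).length : Nat) : Int) := by simp <;> omega
      have hend : ((pre.length + g.length + lt.length + (x :: sc).length : Nat) : Int)
          = ((pre.length + g.length + (lt ++ [x]).length + sc.length : Nat) : Int) := by
        simp; omega
      rw [heq1, harg, hend]
      obtain ⟨lt', h1, h2⟩ := ih g (lt ++ [x]) pre rest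
      refine ⟨lt', ?_, ?_⟩
      · rw [h1]
        simp [hx]
      · refine h2.trans ?_
        simp [hx]

-- partition on a decomposed list
lemma pvPartition_decomp (pre sc tail : List (List (String × Int))) (p : List (String × Int)) :
    ∃ R, pvPartition (pre ++ sc ++ p :: tail) (pre.length : Int) ((pre.length + sc.length : Nat) : Int)
        = (pre ++ sc.filter (fun e => decide (pvSal e ≥ pvSal p)) ++ p :: R ++ tail,
           ((pre.length + (sc.filter (fun e => decide (pvSal e ≥ pvSal p))).length : Nat) : Int))
      ∧ R.Perm (sc.filter (fun e => !decide (pvSal e ≥ pvSal p))) := by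
  have hpiv : pvSal (PySem.List.pyGetD (pre ++ sc ++ p :: tail)
      ((pre.length + sc.length : Nat) : Int) []) = pvSal p := by
    rw [show pre ++ sc ++ p :: tail = (pre ++ sc) ++ p :: tail from by simp]
    rw [show ((pre.length + sc.length : Nat) : Int) = ((pre ++ sc).length : Int) from by simp]
    rw [pvGetAt]
  obtain ⟨lt', h1, h2⟩ := pvLoop (pvSal p) sc [] [] pre (p :: tail)
  simp only [List.nil_append, List.append_nil, List.length_nil, Nat.add_zero] at h1 h2
  set G := sc.filter (fun e => decide (pvSal e ≥ pvSal p)) with hG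
  have hGlen : G.length + (sc.filter (fun e => !decide (pvSal e ≥ pvSal p))).length = sc.length := by
    have := (List.filter_append_perm (fun e => decide (pvSal e ≥ pvSal p)) sc).length_eq
    simpa using this
  have hlt'len : lt'.length = (sc.filter (fun e => !decide (pvSal e ≥ pvSal p))).length :=
    h2.length_eq
  cases hlt : lt' with
  | nil =>
    subst hlt
    have hflen : (sc.filter (fun e => !decide (pvSal e ≥ pvSal p))).length = 0 := by
      simpa using hlt'len.symm
    refine ⟨[], ?_, ?_⟩
    · rw [← List.append_assoc] at h1
      simp only [pvPartition]
      rw [hpiv, h1]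
      rw [Prod.mk.injEq]
      constructor
      · rw [show (((pre.length + G.length : Nat) : Int) - 1 + 1) = ((pre ++ G).length : Int) from by simp <;> omega]
        rw [show ((pre.length + sc.length : Nat) : Int) = ((pre ++ G).length : Int) from by
          simp only [List.length_append]
          omega]
        rw [show pre ++ G ++ ([] ++ p :: tail) = (pre ++ G) ++ p :: tail from by simp]
        rw [pvSwap_self]
        simp
      · omega
    · rw [List.length_eq_zero_iff] at hflen
      rw [hflen]
  | cons a0 l0 =>
    subst hlt
    have hflen : (sc.filter (fun e => !decide (pvSal e ≥ pvSal p))).length = l0.length + 1 := by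
      simpa using hlt'len.symm
    refine ⟨l0 ++ [a0], ?_, ?_⟩
    · rw [← List.append_assoc] at h1
      simp only [pvPartition]
      rw [hpiv, h1]
      rw [Prod.mk.injEq]
      constructor
      · rw [show pre ++ G ++ ((a0 :: l0) ++ p :: tail) = (pre ++ G) ++ a0 :: l0 ++ p :: tail from by simp]
        rw [show (((pre.length + G.length : Nat) : Int) - 1 + 1) = ((pre ++ G).length : Int) from by simp <;> omega]
        rw [show ((pre.length + sc.length : Nat) : Int) = (((pre ++ G).length + l0.length + 1 : Nat) : Int) from by
          simp only [List.length_append]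
          omega]
        rw [pvSwap_decomp (pre ++ G) l0 tail a0 p]
        simp
      · omega
    · exact (List.perm_append_singleton a0 l0).trans h2

-- quicksort on a decomposed list: for any upper bound c of the slice's salaries, the
-- elements with salary = c end up as the slice's prefix in original order
lemma pvQuicksort_decomp :
    ∀ (n : Nat) (pre sc tail : List (List (String × Int))) (low high c : Int),
    (high - low + 1).toNat ≤ n →
    low = (pre.length : Int) →
    high + 1 = ((pre.length + sc.length : Nat) : Int) →
    (∀ e ∈ sc, pvSal e ≤ c) →
    ∃ rest, pvQuicksort (pre ++ sc ++ tail) low high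
        = pre ++ sc.filter (fun e => pvSal e == c) ++ rest ++ tail
      ∧ rest.Perm (sc.filter (fun e => !(pvSal e == c))) := by
  intro n
  induction n with
  | zero =>
    intro pre sc tail low high c hfuel hlow hhigh hbound
    have hsc : sc = [] := by
      rcases sc with _ | ⟨e, sc'⟩
      · rfl
      · exfalso
        simp only [List.length_cons] at hhigh
        push_cast at hhigh hlow
        omega
    subst hsc
    rw [pvQuicksort]
    rw [dif_neg (by push_cast at hhigh hlow ⊢; omega)]
    exact ⟨[], by simp, by simp⟩
  | succ n ih =>
    intro pre sc tail low high c hfuel hlow hhigh hbound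
    by_cases hlh : low < high
    case neg =>
      rw [pvQuicksort, dif_neg hlh]
      rcases sc with _ | ⟨e, _ | ⟨e2, sc'⟩⟩
      · exact ⟨[], by simp, by simp⟩
      · by_cases he : (pvSal e == c) = true
        · refine ⟨[], by simp [he], by simp [he]⟩
        · rw [Bool.not_eq_true] at he
          refine ⟨[e], by simp [he], by simp [he]⟩
      · exfalso
        simp only [List.length_cons] at hhigh
        push_cast at hhigh hlow
        omega
    case pos =>
      -- split the slice into scanned ++ [p]
      have hscne : sc ≠ [] := by
        intro h
        subst h
        simp only [List.length_nil] at hhigh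
        push_cast at hhigh hlow
        omega
      set scanned := sc.dropLast with hscanned
      set p := sc.getLast hscne with hp
      have hsc : scanned ++ [p] = sc := List.dropLast_append_getLast hscne
      have hscanlen : scanned.length + 1 = sc.length := by
        rw [← hsc]; simp
      have hsclen : ((high - low + 1).toNat : Int) = (sc.length : Int) := by
        push_cast at hhigh hlow ⊢
        omega
      have hpmem : p ∈ sc := List.getLast_mem hscne
      have hpc : pvSal p ≤ c := hbound p hpmem
      -- partition
      have harr : pre ++ sc ++ tail = pre ++ scanned ++ p :: tail := by
        rw [← hsc]; simp
      have hhigh' : high = ((pre.length + scanned.length : Nat) : Int) := by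
        push_cast at hhigh ⊢
        omega
      obtain ⟨R, hpart, hRperm⟩ := pvPartition_decomp pre scanned tail p
      set G := scanned.filter (fun e => decide (pvSal e ≥ pvSal p)) with hG
      set FN := scanned.filter (fun e => !decide (pvSal e ≥ pvSal p)) with hFN
      have hGFNlen : G.length + FN.length = scanned.length := by
        have := (List.filter_append_perm (fun e => decide (pvSal e ≥ pvSal p)) scanned).length_eq
        simpa using this
      have hRlen : R.length = FN.length := hRperm.length_eq
      have hpart' : pvPartition (pre ++ sc ++ tail) low high
          = (pre ++ G ++ p :: R ++ tail, ((pre.length + G.length : Nat) : Int)) := by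
        rw [harr, hlow, hhigh']
        exact hpart
      rw [pvQuicksort, dif_pos hlh, hpart']
      simp only []
      -- first recursive call sorts the ≥-block G
      have hGmem : ∀ e ∈ G, e ∈ sc := by
        intro e he
        rw [← hsc]
        exact List.mem_append_left _ (List.mem_of_mem_filter he)
      obtain ⟨rest₁, hqs1, hperm1⟩ := ih pre G (p :: R ++ tail) low
        (((pre.length + G.length : Nat) : Int) - 1) c
        (by
          rw [hlow]
          have h1 : G.length ≤ scanned.length := List.length_filter_le _ _
          push_cast at hsclen ⊢
          omega)
        hlow
        (by push_cast; omega)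
        (fun e he => hbound e (hGmem e he))
      rw [show ((pre ++ G ++ p :: R ++ tail : List (List (String × Int))))
            = pre ++ G ++ (p :: R ++ tail) from by simp]
      rw [hqs1]
      set Gf := G.filter (fun e => pvSal e == c) with hGfdef
      have hlen1 : Gf.length + rest₁.length = G.length := by
        have h1 := (List.filter_append_perm (fun e => pvSal e == c) G).length_eq
        have h2 := hperm1.length_eq
        simp only [List.length_append] at h1
        rw [← hGfdef] at h1
        omega
      -- second recursive call sorts the <-block R
      set pre2 := pre ++ Gf ++ rest₁ ++ [p] with hpre2
      have hpre2len : pre2.length = pre.length + G.length + 1 := by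
        simp [hpre2]
        omega
      have hqs1' : pre ++ Gf ++ rest₁ ++ (p :: R ++ tail) = pre2 ++ R ++ tail := by
        simp [hpre2]
      have hRmem : ∀ e ∈ R, e ∈ scanned := by
        intro e he
        exact List.mem_of_mem_filter (hRperm.mem_iff.mp he)
      obtain ⟨rest₂, hqs2, hperm2⟩ := ih pre2 R tail
        (((pre.length + G.length : Nat) : Int) + 1) high c
        (by
          have h1 : scanned.length ≤ n := by
            push_cast at hfuel hhigh hlow
            omega
          rw [hhigh']
          push_cast
          omega)
        (by push_cast [hpre2len]; omega)
        (by rw [hhigh']; push_cast [hpre2len]; omega)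
        (fun e he => hbound e (by rw [← hsc]; exact List.mem_append_left _ (hRmem e he)))
      rw [hqs1', hqs2]
      -- assemble
      have hRlt : ∀ e ∈ R, pvSal e < pvSal p := by
        intro e he
        have := List.of_mem_filter (hRperm.mem_iff.mp he)
        simp only [Bool.not_eq_eq_eq_not, Bool.not_true, decide_eq_false_iff_not, ge_iff_le,
          not_le] at this
        exact this
      have hRne : ∀ e ∈ R, (pvSal e == c) = false := by
        intro e he
        have h1 := hRlt e he
        simp only [beq_eq_false_iff_ne, ne_eq]
        omega
      have hFNne : ∀ e ∈ FN, (pvSal e == c) = false := by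
        intro e he
        have h1 : pvSal e < pvSal p := by
          have := List.of_mem_filter he
          simp only [Bool.not_eq_eq_eq_not, Bool.not_true, decide_eq_false_iff_not, ge_iff_le,
            not_le] at this
          exact this
        simp only [beq_eq_false_iff_ne, ne_eq]
        omega
      have hRf : R.filter (fun e => pvSal e == c) = [] := by
        rw [List.filter_eq_nil_iff]
        intro e he
        simp [hRne e he]
      have hRfn : R.filter (fun e => !(pvSal e == c)) = R := by
        rw [List.filter_eq_self]
        intro e he
        simp [hRne e he]
      have hrest₂ : rest₂.Perm R := hRfn ▸ hperm2
      have hGf : scanned.filter (fun e => pvSal e == c) = Gf := by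
        rw [hGfdef, hG, List.filter_filter]
        refine (List.filter_congr ?_).symm
        intro e he
        by_cases h1 : pvSal e = c
        · simp [h1, hpc]
        · simp [h1]
      have hFNf : FN.filter (fun e => !(pvSal e == c)) = FN := by
        rw [List.filter_eq_self]
        intro e he
        simp [hFNne e he]
      have hscperm : (scanned.filter (fun e => !(pvSal e == c))).Perm
          (G.filter (fun e => !(pvSal e == c)) ++ FN) := by
        have h1 : scanned.Perm (G ++ FN) := (List.filter_append_perm _ scanned).symm
        have h2 : (G ++ FN).filter (fun e => !(pvSal e == c))
            = G.filter (fun e => !(pvSal e == c)) ++ FN := by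
          rw [List.filter_append, hFNf]
        exact h2 ▸ (h1.filter _)
      have hfsc : sc.filter (fun e => pvSal e == c)
          = Gf ++ (if (pvSal p == c) = true then [p] else []) := by
        rw [← hsc, List.filter_append, hGf]
        by_cases hb : (pvSal p == c) = true
        · simp [hb]
        · rw [Bool.not_eq_true] at hb
          simp [hb]
      have hfscn : (sc.filter (fun e => !(pvSal e == c)))
          = scanned.filter (fun e => !(pvSal e == c))
            ++ (if (pvSal p == c) = true then [] else [p]) := by
        rw [← hsc, List.filter_append]
        by_cases hb : (pvSal p == c) = true
        · simp [hb]
        · rw [Bool.not_eq_true] at hb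
          simp [hb]
      by_cases hpeq : (pvSal p == c) = true
      · -- the pivot itself carries the top salary: the ≥-block is all-top
        have hpc' : pvSal p = c := by simpa using hpeq
        have hGeq : ∀ e ∈ G, (pvSal e == c) = true := by
          intro e he
          have h1 : pvSal p ≤ pvSal e := by
            have := List.of_mem_filter he
            simpa using this
          have h2 : pvSal e ≤ c := hbound e (hGmem e he)
          simp only [beq_iff_eq]
          omega
        have hGfG : Gf = G := by
          rw [hGfdef, List.filter_eq_self]
          exact hGeq
        have hGfn : G.filter (fun e => !(pvSal e == c)) = [] := by
          rw [List.filter_eq_nil_iff]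
          intro e he
          simp [hGeq e he]
        have hrest₁ : rest₁ = [] := List.Perm.eq_nil (hGfn ▸ hperm1)
        refine ⟨rest₂, ?_, ?_⟩
        · rw [hfsc, if_pos hpeq, hpre2, hGfG, hrest₁, hRf]
          simp
        · rw [hfscn, if_pos hpeq, List.append_nil]
          refine (hrest₂.trans hRperm).trans ?_
          have h3 := hscperm
          rw [hGfn, List.nil_append] at h3
          exact h3.symm
      · -- pivot below the top: everything with the top salary sits in the ≥-block
        refine ⟨rest₁ ++ p :: rest₂, ?_, ?_⟩
        · rw [hfsc, if_neg hpeq, hpre2, hRf]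
          simp
        · rw [hfscn, if_neg hpeq]
          have h1 : (rest₁ ++ p :: rest₂).Perm ((rest₁ ++ rest₂) ++ [p]) := by
            have h0 := List.Perm.append_left rest₁ (List.perm_append_singleton p rest₂).symm
            simpa [List.append_assoc] using h0
          refine h1.trans ?_
          refine List.Perm.append ?_ (List.Perm.refl [p])
          refine (List.Perm.append hperm1 (hrest₂.trans hRperm)).trans hscperm.symm

-- the B-side fold computes an attained upper bound of the salaries
lemma pvFoldMax :
    ∀ (l : List (List (String × Int))) (t : Int),
    t ≤ l.foldl (fun t e => if pvSal e > t then pvSal e else t) t ∧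
    (l.foldl (fun t e => if pvSal e > t then pvSal e else t) t = t ∨
      ∃ e ∈ l, pvSal e = l.foldl (fun t e => if pvSal e > t then pvSal e else t) t) ∧
    ∀ e ∈ l, pvSal e ≤ l.foldl (fun t e => if pvSal e > t then pvSal e else t) t := by
  intro l
  induction l with
  | nil => simp
  | cons x xs ih =>
    intro t
    simp only [List.foldl_cons, List.mem_cons]
    by_cases hx : pvSal x > t
    · rw [if_pos hx]
      obtain ⟨h1, h2, h3⟩ := ih (pvSal x)
      refine ⟨by omega, ?_, ?_⟩
      · rcases h2 with h2 | ⟨e, he, hee⟩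
        · exact Or.inr ⟨x, Or.inl rfl, h2.symm ▸ rfl⟩
        · exact Or.inr ⟨e, Or.inr he, hee⟩
      · rintro e (rfl | he)
        · omega
        · exact h3 e he
    · rw [if_neg hx]
      obtain ⟨h1, h2, h3⟩ := ih t
      refine ⟨h1, ?_, ?_⟩
      · rcases h2 with h2 | h2
        · exact Or.inl h2
        · exact Or.inr (h2.imp fun e ⟨he, hee⟩ => ⟨Or.inr he, hee⟩)
      · rintro e (rfl | he)
        · omega
        · exact h3 e he

lemma pvCollect_all (hs : Int) (l1 l2 : List (List (String × Int)))
    (h : ∀ e ∈ l1, pvSal e = hs) :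
    pvCollect hs (l1 ++ l2) = l1 ++ pvCollect hs l2 := by
  induction l1 with
  | nil => simp
  | cons x xs ih =>
    simp only [List.cons_append, pvCollect]
    rw [if_pos (h x (by simp))]
    rw [ih (fun e he => h e (by simp [he]))]

-- ===== VERDICT (by name: the statement is the Claim_ definition above) =====
theorem find_highest_salary_spec : Claim_equal_find_highest_salary := by
  intro employees _ hpre
  obtain ⟨hne, _⟩ := hpre
  unfold Spec_find_highest_salary
  rcases hemp : employees with _ | ⟨e0, es⟩
  · exact absurd hemp hne
  rw [← hemp]
  -- the value B computes: an attained upper bound of all salaries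
  set T := employees.foldl (fun t e => if pvSal e > t then pvSal e else t)
    (pvSal (PySem.List.pyGetD employees 0 [])) with hT
  obtain ⟨hle, hatt, hbnd⟩ := pvFoldMax employees (pvSal (PySem.List.pyGetD employees 0 []))
  have hget0 : PySem.List.pyGetD employees 0 [] = e0 := by
    rw [hemp]
    exact PySem.List.pyGetD_zero_cons e0 es []
  have hattained : ∃ e ∈ employees, pvSal e = T := by
    rcases hatt with h | h
    · exact ⟨e0, by rw [hemp]; simp, by rw [← hT] at h; rw [h, hget0]⟩
    · rw [← hT] at h; exact h
  -- A: quicksort the whole list, then collect the leading equal-salary block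
  obtain ⟨rest, hqs, hperm⟩ := pvQuicksort_decomp employees.length [] employees []
    0 ((employees.length : Int) - 1) T
    (by omega) (by simp) (by simp only [List.length_nil, Nat.zero_add]; push_cast; omega)
    (fun e he => hbnd e he)
  simp only [List.nil_append, List.append_nil] at hqs
  set F := employees.filter (fun e => pvSal e == T) with hF
  have hFne : F ≠ [] := by
    obtain ⟨e, he, hee⟩ := hattained
    intro hnil
    have : e ∈ F := List.mem_filter.mpr ⟨he, by simp [hee]⟩
    rw [hnil] at this
    exact absurd this (List.not_mem_nil)
  rcases hFc : F with _ | ⟨x, xs⟩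
  · exact absurd hFc hFne
  have hxT : pvSal x = T := by
    have : x ∈ F := by rw [hFc]; simp
    have := List.of_mem_filter this
    simpa using this
  have hrestne : ∀ e ∈ rest, pvSal e ≠ T := by
    intro e he
    have := List.of_mem_filter (hperm.mem_iff.mp he)
    simpa using this
  have hA : find_highest_salary employees
      = pvCollect (pvSal (PySem.List.pyGetD
          (pvQuicksort employees 0 ((employees.length : Int) - 1)) 0 []))
        (pvQuicksort employees 0 ((employees.length : Int) - 1)) := rfl
  have hB : find_highest_salary_alt employees = employees.filter (fun e => pvSal e == T) := by
    rw [hT]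
    rfl
  rw [hA, hB, hqs, ← hF, hFc]
  rw [show ((x :: xs ++ rest : List (List (String × Int)))) = x :: (xs ++ rest) from by simp]
  rw [PySem.List.pyGetD_zero_cons x (xs ++ rest) []]
  rw [show (x :: (xs ++ rest) : List (List (String × Int))) = (x :: xs) ++ rest from by simp]
  rw [pvCollect_all (pvSal x) (x :: xs) rest (by
    intro e he
    rw [← hFc] at he
    have := List.of_mem_filter he
    rw [hxT]
    simpa using this)]
  have hcrest : pvCollect (pvSal x) rest = [] := by
    rcases rest with _ | ⟨r, rs⟩
    · rfl
    · simp only [pvCollect]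
      rw [if_neg (by rw [hxT]; exact hrestne r (by simp))]
  rw [hcrest]
  simp
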